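-- pv_equiv track=rewrite | github.com/N-Uladzislau/Codewars | Frog jumping.py | solution
-- ===== SOURCE A (Python) =====
-- def solution(a: list) -> int:
--     # jumps  [1, 2, 2, -1] jump      position jump_counter
--     # 0      [*,  ,  ,   ]           0        0
--     # 1      [ , *,  ,   ] 1  /1     1        1
--     # 2      [ ,  ,  ,  *] 2  /2     3        2
--     # 3      [ ,  , *,   ] -1 /2     2        3
--     # 4      [ ,  ,  ,   ] 2  /-1    4        4
--
--     jump_counter = 0                                # set jump counter to 0
--     position = 0                                    # set frog position to 0
--     for i in range(len(a)):                         # while not repeating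
--         jump = a[position]
--         position += jump                            # add specified jump to frog position
--         jump_counter += 1                           # increase jump counter
--         if position < 0 or position > len(a) - 1:   # if frog position isn't in a range
--             return jump_counter                     # then return jump counter
--     return -1
-- ===== SOURCE B (Python) =====
-- def solution(a: list) -> int:
--     # Explicit cycle detection with a visited set; frog already outside an
--     # empty board escapes with 0 jumps (A returns -1 there).
--     visited = set()
--     position = 0
--     jump_counter = 0
--     while 0 <= position <= len(a) - 1:
--         if position in visited:
--             return -1
--         visited.add(position)
--         position += a[position]
--         jump_counter += 1
--     return jump_counter
-- ===== Notes on version B (the rewrite author's own statement) =====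
-- stated objective: alternative
-- what changed: Replaces the len(a)-bounded for-loop (implicit pigeonhole cycle detection) by an unbounded while loop with an explicit visited-set cycle detector that checks the range before indexing.
-- intended difference: On the empty list A returns -1 (its loop body never runs) although the frog starts already out of bounds; B returns 0 jumps, the intended escape count. — e.g. on solution([]): A returns -1, B returns 0
import Mathlib
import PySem

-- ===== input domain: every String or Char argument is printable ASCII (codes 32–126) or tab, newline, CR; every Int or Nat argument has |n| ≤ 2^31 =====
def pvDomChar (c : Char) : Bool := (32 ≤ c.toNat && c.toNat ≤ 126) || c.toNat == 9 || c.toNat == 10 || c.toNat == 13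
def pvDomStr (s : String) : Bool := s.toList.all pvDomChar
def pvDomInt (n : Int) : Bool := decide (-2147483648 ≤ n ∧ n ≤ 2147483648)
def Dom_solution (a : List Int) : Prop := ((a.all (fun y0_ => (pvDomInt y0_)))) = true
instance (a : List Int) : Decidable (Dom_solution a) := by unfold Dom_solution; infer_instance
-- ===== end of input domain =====

-- B replaces A's len(a)-bounded for-loop (implicit pigeonhole cycle detection) with an
-- unbounded while loop carrying an explicit visited set, checking the range before indexing.

-- ===== PORT A =====
-- the for-loop over range(len(a)); fuel = remaining iterations
def solutionLoop (a : List Int) (fuel : Nat) (position jump_counter : Int) : Int :=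
  match fuel with
  | 0 => -1
  | Nat.succ f =>
    match PySem.List.pyGet? a position with
    | none => 0  -- unreachable: as in the Python, position is always in range when read
    | some jump =>
      let position' := position + jump
      let jump_counter' := jump_counter + 1
      if position' < 0 ∨ position' > (a.length : Int) - 1 then jump_counter'
      else solutionLoop a f position' jump_counter'

def solution (a : List Int) : Int := solutionLoop a a.length 0 0

-- ===== PORT B =====
-- the while loop; fuel a.length+1 is only a totality guard (proved sufficient below)
def solutionAltLoop (a : List Int) (fuel : Nat) (visited : PySem.Set Int)
    (position jump_counter : Int) : Int :=
  match fuel with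
  | 0 => 0  -- unreachable: fuel a.length+1 always suffices
  | Nat.succ f =>
    if 0 ≤ position ∧ position ≤ (a.length : Int) - 1 then
      if PySem.Set.contains visited position then -1
      else
        match PySem.List.pyGet? a position with
        | none => 0  -- unreachable: position was just checked to be in range
        | some jump =>
          solutionAltLoop a f (PySem.Set.add visited position) (position + jump) (jump_counter + 1)
    else jump_counter

def solution_alt (a : List Int) : Int := solutionAltLoop a (a.length + 1) PySem.Set.empty 0 0

-- ===== PRECONDITION & SPEC =====
-- On the empty list A returns -1 (its loop body never runs) although the frog starts already
-- out of bounds; B returns 0 jumps, the intended escape count.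
def D_solution (a : List Int) : Prop := a = []
instance (a : List Int) : Decidable (D_solution a) := by unfold D_solution; infer_instance
def Spec_solution (a : List Int) (out : Int) : Prop := ¬ D_solution a → out = solution_alt a
instance (a : List Int) (out : Int) : Decidable (Spec_solution a out) := by unfold Spec_solution; infer_instance
def pvDiffWitness_solution : List Int := []
def pvDiffWitnessOut_solution : Int × Int := (-1, 0)

-- ===== CLAIM (what is proved, stated in full; the proofs are below) =====
def Claim_unchanged_solution : Prop := ∀ (a : List Int), Dom_solution a → Spec_solution a (solution a)
def Claim_changed_solution : Prop := Dom_solution (pvDiffWitness_solution) ∧ D_solution (pvDiffWitness_solution) ∧ solution (pvDiffWitness_solution) = pvDiffWitnessOut_solution.1 ∧ solution_alt (pvDiffWitness_solution) = pvDiffWitnessOut_solution.2 ∧ pvDiffWitnessOut_solution.1 ≠ pvDiffWitnessOut_solution.2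
def Claim_exact_solution : Prop := ∀ (a : List Int), Dom_solution a → D_solution a → solution a ≠ solution_alt a

-- ===== LEMMAS AND PROOFS =====

-- the common step function: one jump from p (total form; agrees with both loops in range)
def stepF (a : List Int) (p : Int) : Int := p + (PySem.List.pyGet? a p).getD 0
def itf (a : List Int) (k : Nat) (p : Int) : Int := (stepF a)^[k] p
def inRb (a : List Int) (p : Int) : Bool := decide (0 ≤ p ∧ p ≤ (a.length : Int) - 1)

-- shared result of both loops from an in-range position p with counter c
noncomputable def resB (a : List Int) (p c : Int) : Int :=
  letI := Classical.propDecidable (∃ k : Nat, inRb a (itf a (k + 1) p) = false)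
  if inRb a p = false then c
  else if h : ∃ k : Nat, inRb a (itf a (k + 1) p) = false then c + 1 + (Nat.find h : Int) else -1

-- A's loop result: same, but the escape must occur within fuel f
noncomputable def resA (a : List Int) (f : Nat) (p c : Int) : Int :=
  letI := Classical.propDecidable (∃ k : Nat, inRb a (itf a (k + 1) p) = false)
  if h : ∃ k : Nat, inRb a (itf a (k + 1) p) = false then
    (if Nat.find h < f then c + 1 + (Nat.find h : Int) else -1)
  else -1

theorem pyGet?_some_of_inRb {a : List Int} {p : Int} (h : inRb a p = true) :
    ∃ j, PySem.List.pyGet? a p = some j := by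
  simp only [inRb, decide_eq_true_eq] at h
  rcases hop : PySem.List.pyGet? a p with _ | j
  · rw [PySem.List.pyGet?_eq_none_iff] at hop
    exfalso; apply hop
    constructor <;> omega
  · exact ⟨j, rfl⟩

theorem find_succ_shift {P Q : Nat → Prop} [DecidablePred P] [DecidablePred Q]
    (hP : ∃ k, P k) (hQ : ∃ k, Q k) (h0 : ¬ P 0) (hPQ : ∀ k, Q k ↔ P (k + 1)) :
    Nat.find hP = Nat.find hQ + 1 := by
  have h1 : P (Nat.find hQ + 1) := (hPQ _).mp (Nat.find_spec hQ)
  have le1 : Nat.find hP ≤ Nat.find hQ + 1 := Nat.find_le h1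
  have h2 : Nat.find hP ≠ 0 := fun e => h0 (e ▸ Nat.find_spec hP)
  obtain ⟨m, hm⟩ := Nat.exists_eq_succ_of_ne_zero h2
  have hQm : Q m := by
    apply (hPQ m).mpr
    have := Nat.find_spec hP
    rwa [hm] at this
  have le2 : Nat.find hQ ≤ m := Nat.find_le hQm
  omega

theorem shift_iff (a : List Int) (p : Int) (k : Nat) :
    (inRb a (itf a (k + 1) (stepF a p)) = false) ↔ (inRb a (itf a (k + 1 + 1) p) = false) := by
  have : itf a (k + 1 + 1) p = itf a (k + 1) (stepF a p) := by
    simp [itf, Function.iterate_succ_apply]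
  rw [this]

theorem cycInR (a : List Int) (x : Int) (m : Nat) (hm : 1 ≤ m) (hc : itf a m x = x)
    (hj : ∀ j < m, inRb a (itf a j x) = true) : ∀ k, inRb a (itf a k x) = true := by
  intro k
  induction k using Nat.strong_induction_on with
  | _ k IH =>
    by_cases hk : k < m
    · exact hj k hk
    · have h1 : (k - m) + m = k := by omega
      have h2 : itf a k x = itf a (k - m) x := by
        calc itf a k x = itf a ((k - m) + m) x := by rw [h1]
          _ = (stepF a)^[k - m] ((stepF a)^[m] x) := Function.iterate_add_apply _ _ _ _
          _ = itf a (k - m) x := by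
              rw [show (stepF a)^[m] x = x from hc]; rfl
      rw [h2]
      exact IH (k - m) (by omega)

theorem resA_shift (a : List Int) (f : Nat) (p c : Int) (hp' : inRb a (stepF a p) = true) :
    resA a (f + 1) p c = resA a f (stepF a p) (c + 1) := by
  unfold resA
  have h0 : ¬ (inRb a (itf a (0 + 1) p) = false) := by
    simp only [Nat.zero_add, itf, Function.iterate_one, hp']
    simp
  by_cases hq : ∃ k : Nat, inRb a (itf a (k + 1) (stepF a p)) = false
  · have hpe : ∃ k : Nat, inRb a (itf a (k + 1) p) = false := by
      obtain ⟨k, hk⟩ := hq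
      exact ⟨k + 1, (shift_iff a p k).mp hk⟩
    rw [dif_pos hpe, dif_pos hq,
      find_succ_shift hpe hq h0 (fun k => shift_iff a p k)]
    split_ifs <;> push_cast <;> omega
  · have hpe : ¬ ∃ k : Nat, inRb a (itf a (k + 1) p) = false := by
      rintro ⟨k, hk⟩
      cases k with
      | zero => exact h0 hk
      | succ k => exact hq ⟨k, (shift_iff a p k).mpr hk⟩
    rw [dif_neg hpe, dif_neg hq]

theorem resB_shift (a : List Int) (p c : Int) (hp : inRb a p = true) :
    resB a p c = resB a (stepF a p) (c + 1) := by
  unfold resB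
  by_cases hp' : inRb a (stepF a p) = true
  · have h0 : ¬ (inRb a (itf a (0 + 1) p) = false) := by
      simp only [Nat.zero_add, itf, Function.iterate_one, hp']
      simp
    rw [if_neg (by simp [hp]), if_neg (by simp [hp'])]
    by_cases hq : ∃ k : Nat, inRb a (itf a (k + 1) (stepF a p)) = false
    · have hpe : ∃ k : Nat, inRb a (itf a (k + 1) p) = false := by
        obtain ⟨k, hk⟩ := hq
        exact ⟨k + 1, (shift_iff a p k).mp hk⟩
      rw [dif_pos hpe, dif_pos hq,
        find_succ_shift hpe hq h0 (fun k => shift_iff a p k)]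
      push_cast
      ring
    · have hpe : ¬ ∃ k : Nat, inRb a (itf a (k + 1) p) = false := by
        rintro ⟨k, hk⟩
        cases k with
        | zero => exact h0 hk
        | succ k => exact hq ⟨k, (shift_iff a p k).mpr hk⟩
      rw [dif_neg hpe, dif_neg hq]
  · have hf : inRb a (stepF a p) = false := by
      revert hp'; cases inRb a (stepF a p) <;> simp
    have hpe : ∃ k : Nat, inRb a (itf a (k + 1) p) = false :=
      ⟨0, by simpa [itf] using hf⟩
    rw [if_neg (by simp [hp]), if_pos hf, dif_pos hpe]
    have hz : Nat.find hpe = 0 := by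
      rw [Nat.find_eq_zero]
      simpa [itf] using hf
    rw [hz]
    norm_num

theorem la (a : List Int) : ∀ (f : Nat) (p c : Int), inRb a p = true →
    solutionLoop a f p c = resA a f p c := by
  intro f
  induction f with
  | zero =>
    intro p c hp
    simp only [solutionLoop]
    unfold resA
    split_ifs <;> omega
  | succ f IH =>
    intro p c hp
    obtain ⟨j, hj⟩ := pyGet?_some_of_inRb hp
    have hstep : stepF a p = p + j := by simp [stepF, hj]
    simp only [solutionLoop, hj]
    by_cases hoob : p + j < 0 ∨ p + j > (a.length : Int) - 1
    · rw [if_pos hoob]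
      have hf : inRb a (itf a (0 + 1) p) = false := by
        simp only [Nat.zero_add, itf, Function.iterate_one, hstep, inRb,
          decide_eq_false_iff_not]
        omega
      unfold resA
      have hpe : ∃ k : Nat, inRb a (itf a (k + 1) p) = false := ⟨0, hf⟩
      rw [dif_pos hpe]
      have hz : Nat.find hpe = 0 := by rw [Nat.find_eq_zero]; exact hf
      rw [hz]
      norm_num
    · rw [if_neg hoob]
      have hp' : inRb a (stepF a p) = true := by
        simp only [hstep, inRb, decide_eq_true_eq]
        omega
      rw [IH (p + j) (c + 1) (by rwa [hstep] at hp')]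
      rw [← hstep, ← resA_shift a f p c hp']

theorem pigeon (a : List Int) (v : List Int) (hn : v.Nodup)
    (hr : ∀ x ∈ v, inRb a x = true) : v.length ≤ a.length := by
  have hsub : v.toFinset ⊆ Finset.Icc (0 : Int) ((a.length : Int) - 1) := by
    intro x hx
    have := hr x (List.mem_toFinset.mp hx)
    simp only [inRb, decide_eq_true_eq] at this
    simp only [Finset.mem_Icc]
    omega
  have h1 := Finset.card_le_card hsub
  rw [List.toFinset_card_of_nodup hn, Int.card_Icc] at h1
  omega

theorem lb (a : List Int) : ∀ (f : Nat) (v : PySem.Set Int) (p c : Int), v.Nodup →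
    (∀ x ∈ v, inRb a x = true) → a.length + 1 ≤ v.length + f →
    (∀ x ∈ v, ∃ m, 1 ≤ m ∧ itf a m x = p ∧ ∀ j < m, inRb a (itf a j x) = true) →
    solutionAltLoop a f v p c = resB a p c := by
  intro f
  induction f with
  | zero =>
    intro v p c hn hr hF _
    exact absurd (pigeon a v hn hr) (by omega)
  | succ f IH =>
    intro v p c hn hr hF hflow
    simp only [solutionAltLoop]
    by_cases hinR : 0 ≤ p ∧ p ≤ (a.length : Int) - 1
    · rw [if_pos hinR]
      have hpt : inRb a p = true := by
        simp only [inRb, decide_eq_true_eq]; exact hinR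
      by_cases hmem : p ∈ v
      · rw [if_pos (by simpa using hmem)]
        obtain ⟨m, hm1, hmc, hmj⟩ := hflow p hmem
        have hall := cycInR a p m hm1 hmc hmj
        unfold resB
        rw [if_neg (by simp [hpt]), dif_neg]
        rintro ⟨k, hk⟩
        rw [hall (k + 1)] at hk
        cases hk
      · have hcf : PySem.Set.contains v p = false := by
          simpa using hmem
        rw [if_neg (by simpa using hmem)]
        obtain ⟨j, hj⟩ := pyGet?_some_of_inRb hpt
        have hstep : stepF a p = p + j := by simp [stepF, hj]
        simp only [hj]
        have hnodup' : (PySem.Set.add v p).Nodup := PySem.Set.nodup_add v p hn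
        have hlen' : (PySem.Set.add v p).length = v.length + 1 := by
          simp [PySem.Set.add, hmem]
        have hr' : ∀ x ∈ PySem.Set.add v p, inRb a x = true := by
          intro x hx
          rcases (PySem.Set.mem_add _ _ _).mp hx with h | h
          · exact hr x h
          · subst h; exact hpt
        have hflow' : ∀ x ∈ PySem.Set.add v p,
            ∃ m, 1 ≤ m ∧ itf a m x = p + j ∧ ∀ j' < m, inRb a (itf a j' x) = true := by
          intro x hx
          rcases (PySem.Set.mem_add _ _ _).mp hx with h | h
          · obtain ⟨m, h1, h2, h3⟩ := hflow x h
            refine ⟨m + 1, by omega, ?_, ?_⟩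
            · have : itf a (m + 1) x = stepF a (itf a m x) :=
                Function.iterate_succ_apply' _ _ _
              rw [this, h2, hstep]
            · intro j' hj'
              by_cases hlt : j' < m
              · exact h3 j' hlt
              · have hje : j' = m := by omega
                subst hje
                rw [h2]
                exact hpt
          · subst h
            refine ⟨1, le_refl 1, by simp [itf, hstep], ?_⟩
            intro j' hj'
            have hje : j' = 0 := by omega
            subst hje
            simpa [itf] using hpt
        rw [IH (PySem.Set.add v p) (p + j) (c + 1) hnodup' hr' (by omega) hflow']
        rw [← hstep, ← resB_shift a p c hpt]
    · rw [if_neg hinR]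
      unfold resB
      rw [if_pos (by simp only [inRb, decide_eq_false_iff_not]; exact hinR)]

theorem inRb_zero (a : List Int) (ha : a ≠ []) : inRb a 0 = true := by
  have := List.length_pos_of_ne_nil ha
  simp only [inRb, decide_eq_true_eq]
  omega

theorem find_lt_len (a : List Int) (ha : a ≠ [])
    (h : ∃ k : Nat, inRb a (itf a (k + 1) 0) = false) : Nat.find h < a.length := by
  by_contra hlt
  push_neg at hlt
  have hall : ∀ k ≤ Nat.find h, inRb a (itf a k 0) = true := by
    intro k hk
    cases k with
    | zero => simpa [itf] using inRb_zero a ha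
    | succ k =>
      have hmin := Nat.find_min h (show k < Nat.find h by omega)
      revert hmin
      cases inRb a (itf a (k + 1) 0) <;> simp
  have key : ∀ i j : Nat, i ≤ a.length → j ≤ a.length → i < j →
      itf a i 0 = itf a j 0 → False := by
    intro i j hi hjle hij he
    have hm1 : 1 ≤ j - i := by omega
    have hcyc : itf a (j - i) (itf a i 0) = itf a i 0 := by
      have h1 : (j - i) + i = j := by omega
      calc itf a (j - i) (itf a i 0)
          = (stepF a)^[(j - i) + i] 0 := (Function.iterate_add_apply _ _ _ _).symm
        _ = itf a j 0 := by rw [h1]; rfl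
        _ = itf a i 0 := he.symm
    have hj' : ∀ j' < j - i, inRb a (itf a j' (itf a i 0)) = true := by
      intro j' hj'
      have h2 : itf a j' (itf a i 0) = itf a (j' + i) 0 :=
        (Function.iterate_add_apply _ _ _ _).symm
      rw [h2]
      exact hall (j' + i) (by omega)
    have hallx := cycInR a (itf a i 0) (j - i) hm1 hcyc hj'
    have hNi : itf a (Nat.find h + 1) 0 = itf a (Nat.find h + 1 - i) (itf a i 0) := by
      have h1 : (Nat.find h + 1 - i) + i = Nat.find h + 1 := by omega
      calc itf a (Nat.find h + 1) 0
          = (stepF a)^[(Nat.find h + 1 - i) + i] 0 := by rw [h1]; rfl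
        _ = itf a (Nat.find h + 1 - i) (itf a i 0) := Function.iterate_add_apply _ _ _ _
    have hspec := Nat.find_spec h
    rw [hNi, hallx (Nat.find h + 1 - i)] at hspec
    cases hspec
  have hmaps : ∀ k ∈ Finset.range (a.length + 1),
      itf a k 0 ∈ Finset.Icc (0 : Int) ((a.length : Int) - 1) := by
    intro k hk
    simp only [Finset.mem_range] at hk
    have := hall k (by omega)
    simp only [inRb, decide_eq_true_eq] at this
    simp only [Finset.mem_Icc]
    omega
  have hcard : (Finset.Icc (0 : Int) ((a.length : Int) - 1)).card <
      (Finset.range (a.length + 1)).card := by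
    rw [Int.card_Icc, Finset.card_range]
    omega
  obtain ⟨i, hi, j, hjm, hne, heq⟩ :=
    Finset.exists_ne_map_eq_of_card_lt_of_maps_to hcard hmaps
  simp only [Finset.mem_range] at hi hjm
  rcases Nat.lt_or_ge i j with hij | hij
  · exact key i j (by omega) (by omega) hij heq
  · exact key j i (by omega) (by omega) (by omega) heq.symm


theorem main_eq (a : List Int) (ha : a ≠ []) : solution a = solution_alt a := by
  have h0 := inRb_zero a ha
  rw [solution, solution_alt,
    la a a.length 0 0 h0,
    lb a (a.length + 1) PySem.Set.empty 0 0 List.nodup_nil (by simp [PySem.Set.empty])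
      (by simp [PySem.Set.empty]) (by simp [PySem.Set.empty])]
  unfold resA resB
  rw [if_neg (by simp [h0])]
  by_cases h : ∃ k : Nat, inRb a (itf a (k + 1) 0) = false
  · rw [dif_pos h, dif_pos h, if_pos (find_lt_len a ha h)]
  · rw [dif_neg h, dif_neg h]

-- ===== VERDICT (by name: the statement is the Claim_ definition above) =====
theorem solution_spec : Claim_unchanged_solution := by
  intro a _ hD
  exact main_eq a hD

theorem solution_changed : Claim_changed_solution := by
  unfold Claim_changed_solution; decide

theorem solution_tight : Claim_exact_solution := by
  intro a _ hD
  subst hD; decide
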